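-- pv_equiv track=rewrite | github.com/Gezraf/CollegeProjects-GuyShitrit | Semester1/TCB/Python And Cryptography/ClassWork/Answers/lab7_GuyShitrit.py | Q3
-- ===== SOURCE A (Python) =====
-- def Q3(num1, num2):
--     if num2 > num1 or num1 < 0 or num2 < 0: # ייצא מוקדם אם המספר השני גדול מהראשון או אם אחד/שני המספרים שליליים
--         return -1
--
--     mul = lambda x,y: x * y
--     sum = lambda x,y: x + y
--     diff = lambda x,y: x - y
--
--     def length(num):
--         if num == 0:
--             return 1
--
--         count = 0
--         while num != 0:
--             count += 1
--             num //= 10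
--
--         return count
--
--
--     mul_res = mul(num1, num2)
--     sum_res = sum(num1, num2)
--     diff_res = diff(num1, num2)
--
--     sum_len = length(sum_res)
--     diff_len = length(diff_res)
--
--
--     res = (  mul_res * (10 ** (sum_len + diff_len))
--            + sum_res * (10 ** diff_len)
--            + diff_res)
--
--
--     return res
-- ===== SOURCE B (Python) =====
-- def Q3(num1, num2):
--     if num2 > num1 or num1 < 0 or num2 < 0:
--         return -1
--
--     def digits(n):
--         ds = []
--         while True:
--             n, r = divmod(n, 10)
--             ds.append(r)
--             if n == 0:
--                 break
--         return ds[::-1]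
--
--     res = 0
--     for part in (num1 * num2, num1 + num2, num1 - num2):
--         for d in digits(part):
--             res = res * 10 + d
--     return res
-- ===== Notes on version B (the rewrite author's own statement) =====
-- stated objective: alternative
-- what changed: B drops A's digit-length helper and 10**k exponentiations entirely: it materialises each part's decimal digit list (repeated divmod, reversed) and accumulates the answer with a single Horner fold res = res*10 + d over the concatenated digit stream of product, sum and difference.
import Mathlib
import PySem

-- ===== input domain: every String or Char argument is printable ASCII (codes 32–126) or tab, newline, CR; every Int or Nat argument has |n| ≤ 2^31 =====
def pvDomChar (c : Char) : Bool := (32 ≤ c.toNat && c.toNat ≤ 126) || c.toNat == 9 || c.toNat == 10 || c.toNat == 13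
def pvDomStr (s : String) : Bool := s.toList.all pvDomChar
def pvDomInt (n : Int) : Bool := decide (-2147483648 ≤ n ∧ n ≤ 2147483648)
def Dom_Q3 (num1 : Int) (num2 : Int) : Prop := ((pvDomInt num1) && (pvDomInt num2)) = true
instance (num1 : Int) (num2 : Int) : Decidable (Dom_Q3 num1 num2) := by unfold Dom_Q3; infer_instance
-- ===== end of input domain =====

-- B replaces A's digit-length helper and 10**k exponentiations with a digit-list
-- materialisation plus one Horner fold res = res*10 + d; objective: alternative.

-- ===== PORT A =====
-- A's inner `length`: `while num != 0: count += 1; num //= 10`.  A only calls it with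
-- non-negative arguments (under the guard, sum and diff are >= 0), where Python's `//= 10`
-- coincides with Nat division, so the loop recurses on `num.toNat` — exact on every reachable call.
def pyLenLoop (count : Int) (num : Nat) : Int :=
  if h : num = 0 then count else pyLenLoop (count + 1) (num / 10)
termination_by num
decreasing_by exact Nat.div_lt_self (Nat.pos_of_ne_zero h) (by omega)

def pyLength (num : Int) : Int :=
  if num = 0 then 1 else pyLenLoop 0 num.toNat

def Q3 (num1 : Int) (num2 : Int) : Int :=
  if num2 > num1 ∨ num1 < 0 ∨ num2 < 0 then -1
  else
    let mul_res := num1 * num2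
    let sum_res := num1 + num2
    let diff_res := num1 - num2
    let sum_len := pyLength sum_res
    let diff_len := pyLength diff_res
    mul_res * 10 ^ (sum_len + diff_len).toNat + sum_res * 10 ^ diff_len.toNat + diff_res

-- ===== PORT B =====
-- B's `digits`: `while True: n, r = divmod(n, 10); ds.append(r); if n == 0: break`,
-- then `ds[::-1]`.  B only calls it with non-negative arguments (under the guard all three
-- parts are >= 0), where Python's divmod(n, 10) coincides with Nat divmod, so the loop
-- recurses on `n.toNat` — exact on every reachable call.
def digLoop (n : Nat) (ds : List Int) : List Int :=
  let q := n / 10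
  let ds' := ds ++ [((n % 10 : Nat) : Int)]
  if _h : q = 0 then ds' else digLoop q ds'
termination_by n
decreasing_by exact Nat.div_lt_self (by omega) (by omega)

def pyDigits (n : Nat) : List Int := (digLoop n []).reverse

def Q3_alt (num1 : Int) (num2 : Int) : Int :=
  if num2 > num1 ∨ num1 < 0 ∨ num2 < 0 then -1
  else
    [num1 * num2, num1 + num2, num1 - num2].foldl
      (fun res part => (pyDigits part.toNat).foldl (fun r d => r * 10 + d) res) 0

-- ===== PRECONDITION & SPEC =====
def Spec_Q3 (num1 : Int) (num2 : Int) (out : Int) : Prop := out = Q3_alt num1 num2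
instance (num1 : Int) (num2 : Int) (out : Int) : Decidable (Spec_Q3 num1 num2 out) := by unfold Spec_Q3; infer_instance

-- ===== CLAIM (what is proved, stated in full; the proofs are below) =====
def Claim_equal_Q3 : Prop := ∀ (num1 : Int) (num2 : Int), Dom_Q3 num1 num2 → Spec_Q3 num1 num2 (Q3 num1 num2)

-- ===== LEMMAS AND PROOFS =====

-- digit count with dlen 0 = 0 (proof-side characterisation of A's length loop)
def dlen (n : Nat) : Nat :=
  if h : n = 0 then 0 else dlen (n / 10) + 1
termination_by n
decreasing_by exact Nat.div_lt_self (Nat.pos_of_ne_zero h) (by omega)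

theorem pyLenLoop_eq (n : Nat) : ∀ c : Int, pyLenLoop c n = c + (dlen n : Int) := by
  induction n using Nat.strong_induction_on with
  | _ n IH =>
    intro c
    rw [pyLenLoop, dlen]
    by_cases h : n = 0
    · simp [h]
    · simp only [h, dite_false]
      rw [IH (n / 10) (Nat.div_lt_self (Nat.pos_of_ne_zero h) (by omega))]
      omega

theorem pyLength_cast (n : Nat) : pyLength (n : Int) = 1 + (dlen (n / 10) : Int) := by
  unfold pyLength
  by_cases h : n = 0
  · simp [h, dlen]
  · have hn : ((n : Int) = 0) = False := by simp [h]
    simp only [hn, if_false, Int.toNat_natCast]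
    rw [pyLenLoop_eq]
    conv_lhs => rw [dlen]
    simp [h]
    omega

theorem digLoop_acc (n : Nat) : ∀ ds : List Int, digLoop n ds = ds ++ digLoop n [] := by
  induction n using Nat.strong_induction_on with
  | _ n IH =>
    intro ds
    conv_lhs => rw [digLoop]
    conv_rhs => rw [digLoop]
    by_cases h : n / 10 = 0
    · simp [h]
    · simp only [h, dite_false]
      rw [IH (n / 10) (Nat.div_lt_self (by omega) (by omega)),
          IH (n / 10) (Nat.div_lt_self (by omega) (by omega)) ([] ++ [((n % 10 : Nat) : Int)])]
      simp

-- structural characterisation of B's digit list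
theorem pyDigits_eq (n : Nat) :
    pyDigits n = if n / 10 = 0 then [((n % 10 : Nat) : Int)]
                 else pyDigits (n / 10) ++ [((n % 10 : Nat) : Int)] := by
  unfold pyDigits
  rw [digLoop]
  by_cases h : n / 10 = 0
  · simp [h]
  · simp only [h, dite_false, if_false]
    rw [digLoop_acc]
    simp

theorem pyDigits_length (n : Nat) : (pyDigits n).length = dlen (n / 10) + 1 := by
  induction n using Nat.strong_induction_on with
  | _ n IH =>
    rw [pyDigits_eq]
    by_cases h : n / 10 = 0
    · simp [h, dlen]
    · simp only [h, if_false, List.length_append, List.length_cons, List.length_nil]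
      rw [IH (n / 10) (Nat.div_lt_self (by omega) (by omega))]
      conv_rhs => rw [dlen]
      simp [h]

theorem foldl_pyDigits (n : Nat) : ∀ res : Int,
    (pyDigits n).foldl (fun r d => r * 10 + d) res
      = res * 10 ^ (pyDigits n).length + (n : Int) := by
  induction n using Nat.strong_induction_on with
  | _ n IH =>
    intro res
    rw [pyDigits_eq]
    by_cases h : n / 10 = 0
    · have hn : n < 10 := by omega
      have : n % 10 = n := Nat.mod_eq_of_lt hn
      simp [h, this]
    · simp only [h, if_false, List.foldl_append, List.length_append, List.length_cons,
        List.length_nil, List.foldl_cons, List.foldl_nil]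
      rw [IH (n / 10) (Nat.div_lt_self (by omega) (by omega))]
      have hdm : (n : Int) = ((n / 10 : Nat) : Int) * 10 + ((n % 10 : Nat) : Int) := by
        push_cast
        omega
      rw [hdm, pow_add]
      ring

-- B's digit-list length agrees with A's length helper (both as powers' exponents)
theorem pyDigits_length_toNat (n : Nat) : (pyDigits n).length = (pyLength (n : Int)).toNat := by
  rw [pyDigits_length, pyLength_cast]
  omega

-- ===== VERDICT (by name: the statement is the Claim_ definition above) =====
theorem Q3_spec : Claim_equal_Q3 := by
  intro num1 num2 _
  unfold Spec_Q3 Q3 Q3_alt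
  by_cases hg : (num2 > num1 ∨ num1 < 0 ∨ num2 < 0)
  · simp [hg]
  · simp only [hg, if_false]
    simp only [not_or, not_lt] at hg
    obtain ⟨h21, h1, h2⟩ := hg
    have hm : 0 ≤ num1 * num2 := mul_nonneg h1 h2
    have hs : 0 ≤ num1 + num2 := by omega
    have hd : 0 ≤ num1 - num2 := by omega
    have hm' : ((num1 * num2).toNat : Int) = num1 * num2 := Int.toNat_of_nonneg hm
    have hs' : ((num1 + num2).toNat : Int) = num1 + num2 := Int.toNat_of_nonneg hs
    have hd' : ((num1 - num2).toNat : Int) = num1 - num2 := Int.toNat_of_nonneg hd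
    simp only [List.foldl_cons, List.foldl_nil]
    rw [foldl_pyDigits, foldl_pyDigits, foldl_pyDigits]
    rw [pyDigits_length_toNat, pyDigits_length_toNat, pyDigits_length_toNat]
    rw [hm', hs', hd']
    have hsl : 1 ≤ pyLength (num1 + num2) := by
      rw [← hs', pyLength_cast]; omega
    have hdl : 1 ≤ pyLength (num1 - num2) := by
      rw [← hd', pyLength_cast]; omega
    have hsplit : (pyLength (num1 + num2) + pyLength (num1 - num2)).toNat
        = (pyLength (num1 + num2)).toNat + (pyLength (num1 - num2)).toNat := by
      omega
    rw [hsplit, pow_add]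
    ring
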